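-- pv_equiv track=rewrite | github.com/Kawser-nerd/CLCDSA | Source Codes/AtCoder/arc060/B/4425146.py | solve
-- ===== SOURCE A (Python) =====
-- import math
--
-- def get_sum(base, n):
--     nums = []
--     while n > 0:
--         nums.append(n % base)
--         n //= base
--     return sum(nums)
--
-- def solve(N, S):
--     if S == N:
--         return S + 1
--     for base in range(2, int(math.sqrt(N)) + 2):
--         if S == get_sum(base, N):
--             return base
--     for p in range(int(math.sqrt(N)) + 1, 0, -1):
--         q = S - p
--         if (N - q) % p == 0:
--             base = (N - q) // p
--             if base <= 1 or q < 0 or q >= base: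
--                 continue
--             return base
--     return -1
-- ===== SOURCE B (Python) =====
-- import math
--
-- def digit_sum(base, n):
--     s = 0
--     while n > 0:
--         s += n % base
--         n //= base
--     return s
--
-- def solve(N, S):
--     if S == N:
--         return S + 1
--     r = math.isqrt(N)
--     for base in range(2, r + 2):
--         if digit_sum(base, N) == S:
--             return base
--     # large bases b > r+1: N = p*b + q with digits p, q means p*(b-1) = N - S.
--     # Enumerate divisors p of D = N - S; candidate base D//p + 1; keep the smallest valid one.
--     D = N - S
--     best = -1
--     i = 1
--     while i * i <= D:
--         if D % i == 0:
--             for p in (i, D // i):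
--                 base = D // p + 1
--                 q = S - p
--                 if base >= r + 2 and 0 <= q < base and p < base:
--                     if best == -1 or base < best:
--                         best = base
--         i += 1
--     return best
-- ===== Notes on version B (the rewrite author's own statement) =====
-- stated objective: alternative
-- what changed: The large-base phase no longer scans p = isqrt(N)+1..1 descending with an early return: B enumerates the divisors of D = N - S up to isqrt(D), derives each candidate base D//p + 1, validates it as a genuine two-digit representation (1 <= p < base, 0 <= S - p < base, base >= isqrt(N)+2), and returns the minimum valid base.
-- intended difference: On inputs where no base <= isqrt(N)+1 has digit sum S but some divisor p of N-S in [1, isqrt(N)+1] passes A's checks with p >= base = (N-S)//p+1 (so p,q are not actual digits), A returns that base although N's digit sum in it is not S (e.g. A(6,3)=2 though 6 is 110 in base 2, digit sum 2), while B returns the smallest genuinely valid base or -1 (B(6,3)=4: 6 = '12' in base 4); B's value is the intended one. — e.g. on solve(6, 3): A returns 2, B returns 4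
import Mathlib
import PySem

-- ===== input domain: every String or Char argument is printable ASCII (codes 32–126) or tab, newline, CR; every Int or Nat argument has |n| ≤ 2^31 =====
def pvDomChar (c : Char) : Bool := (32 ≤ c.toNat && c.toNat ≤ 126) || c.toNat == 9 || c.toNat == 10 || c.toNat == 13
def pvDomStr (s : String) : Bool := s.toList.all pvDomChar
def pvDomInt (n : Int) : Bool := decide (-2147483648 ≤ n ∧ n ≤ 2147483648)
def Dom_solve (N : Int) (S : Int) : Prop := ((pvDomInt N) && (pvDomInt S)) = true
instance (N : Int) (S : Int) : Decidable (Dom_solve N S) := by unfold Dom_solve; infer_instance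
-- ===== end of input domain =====

-- B replaces A's descending p-scan (early return) over large bases by enumerating the
-- divisors of N - S and taking the minimum valid candidate base (objective: alternative).
-- A raises (math domain error) for N < 0: excluded by Pre_solve.

-- integer square root (binary search; structural so that the kernel can evaluate it);
-- on the domain 0 ≤ N ≤ 2^31 this is exactly Python's int(math.sqrt(N)) and math.isqrt(N)
def pvSqrtGo (n : Nat) : Nat → Nat → Nat → Nat
  | 0, lo, _ => lo
  | fuel + 1, lo, hi =>
    if hi ≤ lo + 1 then lo
    else
      let m := (lo + hi) / 2
      if m * m ≤ n then pvSqrtGo n fuel m hi else pvSqrtGo n fuel lo m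

def pvSqrt (n : Nat) : Nat := pvSqrtGo n (n + 2) 0 (n + 2)

-- ===== PORT A =====

-- while n > 0: nums.append(n % base); n //= base; return sum(nums)
-- (fuel n.toNat only makes the recursion structural; it is never exhausted since n shrinks)
def getSumGo : Nat → Int → Int → Int
  | 0, _, _ => 0
  | fuel + 1, base, n =>
    if 2 ≤ base ∧ 0 < n then
      PySem.Int.mod n base + getSumGo fuel base (PySem.Int.floordiv n base)
    else 0

def get_sum (base : Int) (n : Int) : Int := getSumGo n.toNat base n

-- for base in range(2, r+2): if S == get_sum(base, N): return base
def solveSmall (N S : Int) : List Int → Option Int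
  | [] => none
  | base :: rest => if S == get_sum base N then some base else solveSmall N S rest

-- for p in range(r+1, 0, -1): …
def solveBig (N S : Int) : List Int → Int
  | [] => -1
  | p :: rest =>
    let q := S - p
    if PySem.Int.mod (N - q) p == 0 then
      let base := PySem.Int.floordiv (N - q) p
      if base ≤ 1 ∨ q < 0 ∨ base ≤ q then solveBig N S rest else base
    else solveBig N S rest

def solve (N : Int) (S : Int) : Int :=
  if S == N then S + 1
  else
    -- int(math.sqrt(N)): equals isqrt on 0 ≤ N ≤ 2^31 (double sqrt is correctly rounded
    -- and N is far below 2^52); N < 0 raises → excluded by Pre_solve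
    let r : Int := (pvSqrt N.toNat : Int)
    match solveSmall N S (PySem.List.pyRange 2 (r + 2) 1) with
    | some base => base
    | none => solveBig N S (PySem.List.pyRange (r + 1) 0 (-1))

-- ===== PORT B =====

-- s = 0; while n > 0: s += n % base; n //= base; return s   (fuel as above)
def digitAuxGo : Nat → Int → Int → Int → Int
  | 0, _, _, s => s
  | fuel + 1, base, n, s =>
    if 2 ≤ base ∧ 0 < n then
      digitAuxGo fuel base (PySem.Int.floordiv n base) (s + PySem.Int.mod n base)
    else s

def digit_sum (base : Int) (n : Int) : Int := digitAuxGo n.toNat base n 0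

-- for base in range(2, r+2): if digit_sum(base, N) == S: return base
def smallLoop (N S : Int) : List Int → Option Int
  | [] => none
  | base :: rest => if digit_sum base N == S then some base else smallLoop N S rest

-- body of "for p in (i, D//i): …" : try one candidate divisor p, keep the smaller base
def consider (S r D : Int) (p : Int) (best : Int) : Int :=
  let base := PySem.Int.floordiv D p + 1
  let q := S - p
  if r + 2 ≤ base ∧ 0 ≤ q ∧ q < base ∧ p < base then
    if best = -1 ∨ base < best then base else best
  else best

-- while i*i <= D: if D % i == 0: …; i += 1   (fuel D.toNat, never exhausted)
def divLoopGo (S r D : Int) : Nat → Int → Int → Int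
  | 0, _, best => best
  | fuel + 1, i, best =>
    if i * i ≤ D then
      divLoopGo S r D fuel (i + 1)
        (if PySem.Int.mod D i == 0 then
          consider S r D (PySem.Int.floordiv D i) (consider S r D i best)
        else best)
    else best

def solve_alt (N : Int) (S : Int) : Int :=
  if S == N then S + 1
  else
    -- math.isqrt(N); raises for N < 0 → excluded by Pre_solve
    let r : Int := (pvSqrt N.toNat : Int)
    match smallLoop N S (PySem.List.pyRange 2 (r + 2) 1) with
    | some base => base
    | none => divLoopGo S r (N - S) (N - S).toNat 1 (-1)

-- ===== PRECONDITION & SPEC =====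

-- Pre_ excludes N < 0, on which A raises ValueError (math.sqrt domain error).
def Pre_solve (N : Int) (S : Int) : Prop := 0 ≤ N
instance (N : Int) (S : Int) : Decidable (Pre_solve N S) := by unfold Pre_solve; infer_instance
def pvWitness_solve : Int × Int := (10, 2)

-- the sum of the (first f) base-b digits of n; on the domain |N| ≤ 2^31, fuel 32 covers
-- every digit, so pvDS 32 b n is THE base-b digit sum of n
def pvDS : Nat → Nat → Nat → Nat
  | 0, _, _ => 0
  | f + 1, b, n => n % b + pvDS f b (n / b)

-- On inputs where no base in [2, isqrt(N)+1] has digit sum S but some divisor p of N-S in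
-- [1, isqrt(N)+1] passes A's checks with p ≥ base = (N-S)/p+1 (so p, q are not actual
-- digits of N), A returns that base although N's digit sum in it is not S, while B returns
-- the smallest genuinely valid base (or -1); B's value is the intended one.
def D_solve (N : Int) (S : Int) : Prop :=
  0 ≤ N ∧ S ≠ N ∧
  (∀ b ∈ Finset.Icc 2 (pvSqrt N.toNat + 1), (pvDS 32 b N.toNat : Int) ≠ S) ∧
  ∃ p ∈ Finset.Icc 1 (pvSqrt N.toNat + 1), (N - S) % p = 0 ∧
    1 ≤ (N - S) / p ∧ (p : Int) ≤ S ∧ S - p ≤ (N - S) / p ∧ (N - S) / p < p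
instance (N : Int) (S : Int) : Decidable (D_solve N S) := by unfold D_solve; infer_instance

def Spec_solve (N : Int) (S : Int) (out : Int) : Prop := ¬ D_solve N S → out = solve_alt N S
instance (N : Int) (S : Int) (out : Int) : Decidable (Spec_solve N S out) := by unfold Spec_solve; infer_instance

def pvDiffWitness_solve : Int × Int := (6, 3)
def pvDiffWitnessOut_solve : Int × Int := (2, 4)

-- ===== CLAIM (what is proved, stated in full; the proofs are below) =====
def Claim_unchanged_solve : Prop := ∀ (N : Int) (S : Int), Dom_solve N S → Pre_solve N S → Spec_solve N S (solve N S)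
def Claim_changed_solve : Prop := Dom_solve (pvDiffWitness_solve.1) (pvDiffWitness_solve.2) ∧ Pre_solve (pvDiffWitness_solve.1) (pvDiffWitness_solve.2) ∧ D_solve (pvDiffWitness_solve.1) (pvDiffWitness_solve.2) ∧ solve (pvDiffWitness_solve.1) (pvDiffWitness_solve.2) = pvDiffWitnessOut_solve.1 ∧ solve_alt (pvDiffWitness_solve.1) (pvDiffWitness_solve.2) = pvDiffWitnessOut_solve.2 ∧ pvDiffWitnessOut_solve.1 ≠ pvDiffWitnessOut_solve.2
def Claim_exact_solve : Prop := ∀ (N : Int) (S : Int), Dom_solve N S → Pre_solve N S → D_solve N S → solve N S ≠ solve_alt N S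

-- ===== LEMMAS AND PROOFS =====

-- digit sum of n in base b as a recursion (proof-side bridge between the ports' loops
-- and the closed form pvDigitSum)
def pvDigitsGo : Nat → Int → Int → Int
  | 0, _, _ => 0
  | fuel + 1, b, n => if 2 ≤ b ∧ 0 < n then n % b + pvDigitsGo fuel b (n / b) else 0

def pvDigits (b : Int) (n : Int) : Int := pvDigitsGo n.toNat b n

-- integer square root: spec
lemma pvSqrtGo_spec (n : Nat) : ∀ (fuel lo hi : Nat), lo * lo ≤ n → n < hi * hi → lo < hi →
    hi ≤ lo + 1 + fuel →
    pvSqrtGo n fuel lo hi * pvSqrtGo n fuel lo hi ≤ n ∧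
      n < (pvSqrtGo n fuel lo hi + 1) * (pvSqrtGo n fuel lo hi + 1) := by
  intro fuel
  induction fuel with
  | zero =>
    intro lo hi h1 h2 h3 h4
    show lo * lo ≤ n ∧ n < (lo + 1) * (lo + 1)
    exact ⟨h1, lt_of_lt_of_le h2 (Nat.mul_le_mul (by omega) (by omega))⟩
  | succ fuel ih =>
    intro lo hi h1 h2 h3 h4
    rw [pvSqrtGo]
    by_cases hle : hi ≤ lo + 1
    · simp only [hle, if_true]
      exact ⟨h1, lt_of_lt_of_le h2 (Nat.mul_le_mul (by omega) (by omega))⟩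
    · simp only [hle, if_false]
      by_cases hm : ((lo + hi) / 2) * ((lo + hi) / 2) ≤ n
      · simp only [hm, if_true]
        exact ih ((lo + hi) / 2) hi hm h2 (by omega) (by omega)
      · simp only [hm, if_false]
        exact ih lo ((lo + hi) / 2) h1 (by omega) (by omega) (by omega)

lemma pvSqrt_spec (n : Nat) : pvSqrt n * pvSqrt n ≤ n ∧ n < (pvSqrt n + 1) * (pvSqrt n + 1) := by
  refine pvSqrtGo_spec n (n + 2) 0 (n + 2) (by omega) ?_ (by omega) (by omega)
  nlinarith

-- p ≤ isqrt(N) ↔ p² ≤ N, on the Int side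
lemma le_pvSqrt_iff (N : Int) (hN : 0 ≤ N) (p : Int) (hp : 1 ≤ p) :
    p ≤ (pvSqrt N.toNat : Int) ↔ p * p ≤ N := by
  obtain ⟨hs1, hs2⟩ := pvSqrt_spec N.toNat
  constructor
  · intro h
    have h1 : p * p ≤ (pvSqrt N.toNat : Int) * (pvSqrt N.toNat : Int) :=
      mul_le_mul h h (by omega) (by positivity)
    have h2 : ((pvSqrt N.toNat * pvSqrt N.toNat : Nat) : Int) ≤ ((N.toNat : Nat) : Int) := by
      exact_mod_cast hs1
    push_cast at h2
    omega
  · intro h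
    by_contra hlt
    push_neg at hlt
    have hp1 : (pvSqrt N.toNat : Int) + 1 ≤ p := by omega
    have h1 : ((pvSqrt N.toNat : Int) + 1) * ((pvSqrt N.toNat : Int) + 1) ≤ p * p :=
      mul_le_mul hp1 hp1 (by positivity) (by omega)
    have h2 : ((N.toNat : Nat) : Int) < ((pvSqrt N.toNat + 1) * (pvSqrt N.toNat + 1) : Nat) := by
      exact_mod_cast hs2
    push_cast at h2
    omega


-- fuel irrelevance for pvDigits
lemma pvDigitsGo_congr (b : Int) (hb : 2 ≤ b) : ∀ (f1 f2 : Nat) (n : Int),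
    n.toNat ≤ f1 → n.toNat ≤ f2 → pvDigitsGo f1 b n = pvDigitsGo f2 b n := by
  intro f1
  induction f1 with
  | zero =>
    intro f2 n h1 h2
    have hn : ¬(2 ≤ b ∧ 0 < n) := by omega
    cases f2 with
    | zero => rfl
    | succ f2 => rw [pvDigitsGo, pvDigitsGo, if_neg hn]
  | succ f1 ih =>
    intro f2 n h1 h2
    by_cases hn : 2 ≤ b ∧ 0 < n
    · cases f2 with
      | zero => omega
      | succ f2 =>
        rw [pvDigitsGo, pvDigitsGo, if_pos hn, if_pos hn]
        have hlt : n / b < n := by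
          rw [Int.ediv_lt_iff_lt_mul (by omega)]; nlinarith [hn.2]
        have hnn : 0 ≤ n / b := Int.ediv_nonneg (by omega) (by omega)
        rw [ih f2 (n / b) (by omega) (by omega)]
    · cases f2 with
      | zero => rw [pvDigitsGo, pvDigitsGo, if_neg hn]
      | succ f2 => rw [pvDigitsGo, pvDigitsGo, if_neg hn, if_neg hn]


-- one unfolding step of pvDigits
lemma pvDigits_step (b n : Int) (hb : 2 ≤ b) (hn : 0 < n) :
    pvDigits b n = n % b + pvDigits b (n / b) := by
  obtain ⟨f, hf⟩ : ∃ f : Nat, n.toNat = f + 1 := ⟨n.toNat - 1, by omega⟩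
  have hlt : n / b < n := by rw [Int.ediv_lt_iff_lt_mul (by omega)]; nlinarith
  have hnn : 0 ≤ n / b := Int.ediv_nonneg (by omega) (by omega)
  rw [pvDigits, hf, pvDigitsGo, if_pos ⟨hb, hn⟩, pvDigits,
    pvDigitsGo_congr b hb ((n / b).toNat) f (n / b) (le_refl _) (by omega)]

-- pvDigits agrees with the truncated digit sum used by D_ whenever the fuel covers n
lemma pvDS_eq : ∀ (f b n : Nat), 2 ≤ b → n < b ^ f →
    (pvDS f b n : Int) = pvDigits (b : Int) (n : Int) := by
  intro f
  induction f with
  | zero =>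
    intro b n hb hn
    have hn0 : n = 0 := by simp only [pow_zero] at hn; omega
    subst hn0
    rfl
  | succ f ih =>
    intro b n hb hn
    by_cases h0 : 0 < n
    · have hdlt : n / b < b ^ f := (Nat.div_lt_iff_lt_mul (by omega)).mpr (by
        rw [← pow_succ]; exact hn)
      have hcast : ((n / b : Nat) : Int) = (n : Int) / (b : Int) := by
        rw [← PySem.Int.floordiv_natCast,
          PySem.Int.floordiv_eq_ediv_of_pos (show (0:Int) < (b:Int) by exact_mod_cast (by omega : 0 < b))]
      rw [pvDigits_step (b : Int) (n : Int) (by exact_mod_cast hb) (by exact_mod_cast h0),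
        ← hcast, ← ih b (n / b) hb hdlt, pvDS]
      push_cast
      ring
    · have hn0 : n = 0 := by omega
      subst hn0
      have hz : ∀ g : Nat, pvDS g b 0 = 0 := by
        intro g
        induction g with
        | zero => rfl
        | succ g ihg => rw [pvDS, Nat.zero_mod, Nat.zero_div, ihg]
      rw [hz]
      rfl

-- digit sums: both ports compute pvDigits
lemma getSumGo_eq (fuel : Nat) (b n : Int) (hb : 2 ≤ b) :
    getSumGo fuel b n = pvDigitsGo fuel b n := by
  induction fuel generalizing n with
  | zero => rfl
  | succ fuel ih =>
    show (if 2 ≤ b ∧ 0 < n then PySem.Int.mod n b + getSumGo fuel b (PySem.Int.floordiv n b) else 0) = _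
    rw [pvDigitsGo]
    by_cases h : 2 ≤ b ∧ 0 < n
    · simp only [h, PySem.Int.mod_eq_emod_of_pos (show (0:Int) < b by omega),
        PySem.Int.floordiv_eq_ediv_of_pos (show (0:Int) < b by omega), ih]
    · simp only [h, if_false]

lemma digitAuxGo_eq (fuel : Nat) (b n s : Int) (hb : 2 ≤ b) :
    digitAuxGo fuel b n s = s + pvDigitsGo fuel b n := by
  induction fuel generalizing n s with
  | zero => simp [digitAuxGo, pvDigitsGo]
  | succ fuel ih =>
    show (if 2 ≤ b ∧ 0 < n then digitAuxGo fuel b (PySem.Int.floordiv n b) (s + PySem.Int.mod n b) else s) = _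
    rw [pvDigitsGo]
    by_cases h : 2 ≤ b ∧ 0 < n
    · rw [if_pos h, if_pos h, ih,
        PySem.Int.mod_eq_emod_of_pos (show (0:Int) < b by omega),
        PySem.Int.floordiv_eq_ediv_of_pos (show (0:Int) < b by omega)]
      ring
    · rw [if_neg h, if_neg h]; ring

lemma get_sum_eq (b n : Int) (hb : 2 ≤ b) : get_sum b n = pvDigits b n := by
  exact getSumGo_eq n.toNat b n hb

lemma digit_sum_eq (b n : Int) (hb : 2 ≤ b) : digit_sum b n = pvDigits b n := by
  have := digitAuxGo_eq n.toNat b n 0 hb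
  simpa [digit_sum, pvDigits] using this

-- the two-digit representation N = p*b + q (1 ≤ p < b, 0 ≤ q < b) has digit sum p + q
lemma pvDigits_two_digits (b p q : Int) (hb : 2 ≤ b) (hp1 : 1 ≤ p) (hpb : p < b)
    (hq0 : 0 ≤ q) (hqb : q < b) : pvDigits b (p * b + q) = p + q := by
  have hn2 : 2 ≤ p * b + q := by nlinarith
  have hzero : ∀ f : Nat, pvDigitsGo f b 0 = 0 := by
    intro f; cases f with
    | zero => rfl
    | succ f => rw [pvDigitsGo, if_neg (by omega)]
  have hsingle : ∀ f : Nat, 1 ≤ f → pvDigitsGo f b p = p := by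
    intro f hf
    cases f with
    | zero => omega
    | succ f =>
      rw [pvDigitsGo, if_pos ⟨hb, by omega⟩,
        Int.emod_eq_of_lt (by omega) hpb, Int.ediv_eq_zero_of_lt (by omega) hpb, hzero f]
      ring
  set n : Int := p * b + q with hdefn
  have hmod : n % b = q := by
    have : n = q + b * p := by rw [hdefn]; ring
    rw [this, Int.add_mul_emod_self_left, Int.emod_eq_of_lt hq0 hqb]
  have hdiv : n / b = p := by
    have : n = q + b * p := by rw [hdefn]; ring
    rw [this, Int.add_mul_ediv_left q p (by omega), Int.ediv_eq_zero_of_lt hq0 hqb]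
    ring
  obtain ⟨f, hf⟩ : ∃ f : Nat, n.toNat = f + 1 := ⟨n.toNat - 1, by omega⟩
  have hf1 : 1 ≤ f := by omega
  rw [pvDigits, hf, pvDigitsGo, if_pos ⟨hb, by omega⟩, hmod, hdiv, hsingle f hf1]
  ring

-- small loops
lemma smallLoop_eq_solveSmall (N S : Int) (l : List Int) (hl : ∀ b ∈ l, 2 ≤ b) :
    smallLoop N S l = solveSmall N S l := by
  induction l with
  | nil => rfl
  | cons b rest ih =>
    have hb : 2 ≤ b := hl b (List.mem_cons_self ..)
    rw [smallLoop, solveSmall, digit_sum_eq b N hb, get_sum_eq b N hb]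
    by_cases h : pvDigits b N = S
    · simp [h]
    · simp [h, Ne.symm h, ih (fun x hx => hl x (List.mem_cons_of_mem _ hx))]

lemma solveSmall_eq_none_iff (N S : Int) (l : List Int) (hl : ∀ b ∈ l, 2 ≤ b) :
    solveSmall N S l = none ↔ ∀ b ∈ l, pvDigits b N ≠ S := by
  induction l with
  | nil => simp [solveSmall]
  | cons b rest ih =>
    have hb : 2 ≤ b := hl b (List.mem_cons_self ..)
    rw [solveSmall]
    by_cases h : pvDigits b N = S
    · simp [get_sum_eq b N hb, h]
    · simp only [get_sum_eq b N hb]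
      rw [if_neg (by simpa using Ne.symm h)]
      rw [ih (fun x hx => hl x (List.mem_cons_of_mem _ hx))]
      simp [h]

-- candidate predicates for the second phase
abbrev CandP (S D p : Int) : Prop :=
  D % p = 0 ∧ 2 ≤ D / p + 1 ∧ 0 ≤ S - p ∧ S - p < D / p + 1

abbrev BcandP (S r D p : Int) : Prop :=
  1 ≤ p ∧ D % p = 0 ∧ r + 2 ≤ D / p + 1 ∧ 0 ≤ S - p ∧ S - p < D / p + 1 ∧ p < D / p + 1

-- A's descending scan, folded into a recursion on the upper bound
def aScan (S D : Int) : Nat → Int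
  | 0 => -1
  | k + 1 => if CandP S D ((k : Int) + 1) then D / ((k : Int) + 1) + 1 else aScan S D k

lemma solveBig_eq_aScan (N S : Int) (k : Nat) :
    solveBig N S (PySem.List.pyRange (k : Int) 0 (-1)) = aScan S (N - S) k := by
  induction k with
  | zero => rw [PySem.List.pyRange_neg_one_eq_nil (by omega)]; rfl
  | succ k ih =>
    rw [PySem.List.pyRange_neg_one_cons (by exact_mod_cast Nat.succ_pos k)]
    have hcast : ((k + 1 : Nat) : Int) - 1 = (k : Int) := by push_cast; ring
    set p : Int := ((k + 1 : Nat) : Int) with hp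
    have hp1 : (1 : Int) ≤ p := by rw [hp]; exact_mod_cast Nat.succ_le_succ (Nat.zero_le k)
    have harg : N - (S - p) = (N - S) + 1 * p := by ring
    rw [solveBig]
    simp only [harg, PySem.Int.mod_eq_emod_of_pos (show (0:Int) < p by omega),
      PySem.Int.floordiv_eq_ediv_of_pos (show (0:Int) < p by omega)]
    rw [show ((N - S) + 1 * p) % p = (N - S) % p from by
        rw [show (N - S) + 1 * p = (N - S) + p * 1 by ring, Int.add_mul_emod_self_left],
      Int.add_mul_ediv_right _ _ (show p ≠ 0 by omega)]
    rw [hcast, ih]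
    rw [aScan]
    have hpk : p = (k : Int) + 1 := by rw [hp]; push_cast; ring
    by_cases hm : (N - S) % p = 0
    · rw [if_pos (by simpa using hm)]
      by_cases hbad : (N - S) / p + 1 ≤ 1 ∨ S - p < 0 ∨ (N - S) / p + 1 ≤ S - p
      · rw [if_pos hbad, if_neg (by rw [← hpk]; intro hc; rcases hc with ⟨c1, c2, c3, c4⟩; omega)]
      · rw [if_neg hbad, if_pos (by rw [← hpk]; push_neg at hbad; exact ⟨hm, by omega, by omega, by omega⟩)]
        rw [hpk]
    · rw [if_neg (by simpa using hm), if_neg (by rw [← hpk]; intro hc; exact hm hc.1)]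

lemma aScan_of_none (S D : Int) (k : Nat) (h : ∀ p : Int, 1 ≤ p → p ≤ (k : Int) → ¬CandP S D p) :
    aScan S D k = -1 := by
  induction k with
  | zero => rfl
  | succ k ih =>
    rw [aScan, if_neg (h ((k : Int) + 1) (by omega) (by push_cast; omega))]
    exact ih (fun p h1 h2 => h p h1 (by push_cast; omega))

lemma aScan_of_max (S D : Int) (k : Nat) (pm : Int) (h1 : CandP S D pm) (h2 : 1 ≤ pm)
    (h3 : pm ≤ (k : Int)) (h4 : ∀ p : Int, pm < p → p ≤ (k : Int) → ¬CandP S D p) :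
    aScan S D k = D / pm + 1 := by
  induction k with
  | zero => omega
  | succ k ih =>
    rw [aScan]
    by_cases he : pm = (k : Int) + 1
    · rw [if_pos (he ▸ h1), he]
    · have hlt : pm ≤ (k : Int) := by push_cast at h3 ⊢; omega
      rw [if_neg (h4 ((k : Int) + 1) (by omega) (by push_cast; omega))]
      exact ih hlt (fun p hp1 hp2 => h4 p hp1 (by push_cast at hp2 ⊢; omega))

-- B's divisor loop: invariant, monotonicity, and hitting the candidate p
def bInv (S r D : Int) (x : Int) : Prop :=
  x = -1 ∨ ∃ p : Int, BcandP S r D p ∧ x = D / p + 1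

lemma consider_sound (S r D p best : Int) (hp : 1 ≤ p) (hdvd : D % p = 0)
    (h : bInv S r D best) : bInv S r D (consider S r D p best) := by
  rw [consider, PySem.Int.floordiv_eq_ediv_of_pos (show (0:Int) < p by omega)]
  by_cases hc : r + 2 ≤ D / p + 1 ∧ 0 ≤ S - p ∧ S - p < D / p + 1 ∧ p < D / p + 1
  · rw [if_pos hc]
    by_cases hm : best = -1 ∨ D / p + 1 < best
    · rw [if_pos hm]
      exact Or.inr ⟨p, ⟨hp, hdvd, hc.1, hc.2.1, hc.2.2.1, hc.2.2.2⟩, rfl⟩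
    · rw [if_neg hm]; exact h
  · rw [if_neg hc]; exact h

lemma consider_mono (S r D p best : Int) (hp : 1 ≤ p) (hr : 0 ≤ r) (hb : best ≠ -1) :
    consider S r D p best ≤ best ∧ consider S r D p best ≠ -1 := by
  rw [consider, PySem.Int.floordiv_eq_ediv_of_pos (show (0:Int) < p by omega)]
  by_cases hc : r + 2 ≤ D / p + 1 ∧ 0 ≤ S - p ∧ S - p < D / p + 1 ∧ p < D / p + 1
  · rw [if_pos hc]
    by_cases hm : best = -1 ∨ D / p + 1 < best
    · rw [if_pos hm]
      have := hc.1
      constructor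
      · rcases hm with hm | hm
        · exact absurd hm hb
        · omega
      · omega
    · rw [if_neg hm]; exact ⟨le_refl _, hb⟩
  · rw [if_neg hc]; exact ⟨le_refl _, hb⟩

lemma consider_hit (S r D p best : Int) (h : BcandP S r D p) (hr : 0 ≤ r) :
    consider S r D p best ≤ D / p + 1 ∧ consider S r D p best ≠ -1 := by
  obtain ⟨hp, hdvd, h1, h2, h3, h4⟩ := h
  rw [consider, PySem.Int.floordiv_eq_ediv_of_pos (show (0:Int) < p by omega),
    if_pos ⟨h1, h2, h3, h4⟩]
  by_cases hm : best = -1 ∨ D / p + 1 < best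
  · rw [if_pos hm]; omega
  · rw [if_neg hm]; push_neg at hm; omega

lemma divLoopGo_sound (S r D : Int) : ∀ (fuel : Nat) (i best : Int), 1 ≤ i →
    bInv S r D best → bInv S r D (divLoopGo S r D fuel i best) := by
  intro fuel
  induction fuel with
  | zero => intro i best _ h; exact h
  | succ fuel ih =>
    intro i best hi h
    rw [divLoopGo]
    by_cases hcond : i * i ≤ D
    · rw [if_pos hcond]
      apply ih (i + 1) _ (by omega)
      by_cases hm : PySem.Int.mod D i == 0
      · rw [if_pos hm]
        have hdvd : D % i = 0 := by
          have := (beq_iff_eq ..).mp hm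
          rwa [PySem.Int.mod_eq_emod_of_pos (show (0:Int) < i by omega)] at this
        have hdi1 : i ≤ D / i := (Int.le_ediv_iff_mul_le (by omega)).mpr hcond
        have hdvd2 : D % (D / i) = 0 := by
          apply Int.emod_eq_zero_of_dvd
          obtain ⟨c, hc⟩ := Int.dvd_of_emod_eq_zero hdvd
          rw [hc, Int.mul_ediv_cancel_left c (show i ≠ 0 by omega)]
          exact Dvd.intro i (by ring)
        rw [PySem.Int.floordiv_eq_ediv_of_pos (show (0:Int) < i by omega)]
        exact consider_sound S r D (D / i) _ (by omega) hdvd2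
          (consider_sound S r D i best hi hdvd h)
      · rw [if_neg hm]; exact h
    · rw [if_neg hcond]; exact h

lemma divLoopGo_mono (S r D : Int) (hr : 0 ≤ r) : ∀ (fuel : Nat) (i best : Int), 1 ≤ i → best ≠ -1 →
    divLoopGo S r D fuel i best ≤ best ∧ divLoopGo S r D fuel i best ≠ -1 := by
  intro fuel
  induction fuel with
  | zero => intro i best _ h; exact ⟨le_refl _, h⟩
  | succ fuel ih =>
    intro i best hi h
    rw [divLoopGo]
    by_cases hcond : i * i ≤ D
    · rw [if_pos hcond]
      by_cases hm : PySem.Int.mod D i == 0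
      · rw [if_pos hm, PySem.Int.floordiv_eq_ediv_of_pos (show (0:Int) < i by omega)]
        have hdi1 : i ≤ D / i := (Int.le_ediv_iff_mul_le (by omega)).mpr hcond
        obtain ⟨c1m, c1n⟩ := consider_mono S r D i best hi hr h
        obtain ⟨c2m, c2n⟩ := consider_mono S r D (D / i) _ (by omega) hr c1n
        obtain ⟨c3m, c3n⟩ := ih (i + 1) _ (by omega) c2n
        exact ⟨by omega, c3n⟩
      · rw [if_neg hm]; exact ih (i + 1) best (by omega) h
    · rw [if_neg hcond]; exact ⟨le_refl _, h⟩

lemma divLoopGo_le (S r D : Int) (hr : 0 ≤ r) (p : Int) (hp : BcandP S r D p) :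
    ∀ (fuel : Nat) (i best : Int), 1 ≤ i → i ≤ p → (p + 1 - i).toNat ≤ fuel →
    divLoopGo S r D fuel i best ≤ D / p + 1 ∧ divLoopGo S r D fuel i best ≠ -1 := by
  intro fuel
  induction fuel with
  | zero => intro i best h1 h2 h3; omega
  | succ fuel ih =>
    intro i best hi hip hfuel
    obtain ⟨hp1, hdvd, hc1, hc2, hc3, hc4⟩ := hp
    have hpp : p * p ≤ D := by
      have : p ≤ D / p := by omega
      have := (Int.le_ediv_iff_mul_le (show (0:Int) < p by omega)).mp this
      linarith
    have hcond : i * i ≤ D := le_trans (mul_le_mul hip hip (by omega) (by omega)) hpp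
    rw [divLoopGo, if_pos hcond]
    by_cases hip' : i = p
    · subst hip'
      have hm : PySem.Int.mod D i == 0 := by
        rw [PySem.Int.mod_eq_emod_of_pos (show (0:Int) < i by omega)]
        exact (beq_iff_eq ..).mpr hdvd
      rw [if_pos hm, PySem.Int.floordiv_eq_ediv_of_pos (show (0:Int) < i by omega)]
      have hdi1 : i ≤ D / i := (Int.le_ediv_iff_mul_le (by omega)).mpr hcond
      obtain ⟨c1m, c1n⟩ := consider_hit S r D i best ⟨hp1, hdvd, hc1, hc2, hc3, hc4⟩ hr
      obtain ⟨c2m, c2n⟩ := consider_mono S r D (D / i) _ (by omega) hr c1n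
      obtain ⟨c3m, c3n⟩ := divLoopGo_mono S r D hr fuel (i + 1) _ (by omega) c2n
      exact ⟨by omega, c3n⟩
    · have hlt : i < p := by omega
      by_cases hm : PySem.Int.mod D i == 0
      · rw [if_pos hm]
        exact ih (i + 1) _ (by omega) (by omega) (by omega)
      · rw [if_neg hm]
        exact ih (i + 1) best (by omega) (by omega) (by omega)

lemma divLoop_of_none (S r D : Int) (fuel : Nat) (h : ∀ p : Int, ¬BcandP S r D p) :
    divLoopGo S r D fuel 1 (-1) = -1 := by
  have := divLoopGo_sound S r D fuel 1 (-1) (by omega) (Or.inl rfl)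
  rcases this with h1 | ⟨p, hp, _⟩
  · exact h1
  · exact absurd hp (h p)

lemma divLoop_of_max (S r D : Int) (hr : 0 ≤ r) (pm : Int) (h1 : BcandP S r D pm)
    (hmax : ∀ p : Int, BcandP S r D p → p ≤ pm) (fuel : Nat) (hfuel : pm.toNat ≤ fuel) :
    divLoopGo S r D fuel 1 (-1) = D / pm + 1 := by
  obtain ⟨hp1, hdvd, hc1, hc2, hc3, hc4⟩ := h1
  obtain ⟨hle, hne⟩ := divLoopGo_le S r D hr pm ⟨hp1, hdvd, hc1, hc2, hc3, hc4⟩ fuel 1 (-1)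
    (by omega) hp1 (by omega)
  rcases divLoopGo_sound S r D fuel 1 (-1) (by omega) (Or.inl rfl) with hres | ⟨p', hp', hres⟩
  · exact absurd hres hne
  · obtain ⟨hp'1, hdvd', hc1', hc2', hc3', hc4'⟩ := hp'
    have hple : p' ≤ pm := hmax p' ⟨hp'1, hdvd', hc1', hc2', hc3', hc4'⟩
    -- exact divisions: D = p' * (D / p') = pm * (D / pm); anti-monotone in the divisor
    obtain ⟨c', hcd'⟩ := Int.dvd_of_emod_eq_zero hdvd'
    obtain ⟨cm, hcdm⟩ := Int.dvd_of_emod_eq_zero hdvd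
    have hdp' : D / p' = c' := by rw [hcd', Int.mul_ediv_cancel_left c' (by omega)]
    have hdpm : D / pm = cm := by rw [hcdm, Int.mul_ediv_cancel_left cm (by omega)]
    rw [hdp'] at hres hc4'
    rw [hdpm] at hc4 hle ⊢
    have hcc : cm ≤ c' := by nlinarith [hcd', hcdm]
    omega

-- bridges between the candidate sets (r = isqrt N)
lemma bcand_to_cand (N S p : Int) (hN : 0 ≤ N) (h : BcandP S (pvSqrt N.toNat : Int) (N - S) p) :
    CandP S (N - S) p ∧ 1 ≤ p ∧ p ≤ (pvSqrt N.toNat : Int) + 1 := by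
  obtain ⟨hp1, hdvd, hc1, hc2, hc3, hc4⟩ := h
  have hr0 : (0 : Int) ≤ (pvSqrt N.toNat : Int) := by positivity
  refine ⟨⟨hdvd, by omega, hc2, hc3⟩, hp1, ?_⟩
  have hpp : p * p ≤ N - S := by
    have h5 : p ≤ (N - S) / p := by omega
    have := (Int.le_ediv_iff_mul_le (show (0:Int) < p by omega)).mp h5
    linarith
  have hS : 0 < S := by omega
  have : p * p ≤ N := by omega
  have := (le_pvSqrt_iff N hN p hp1).mpr this
  omega

lemma cand_to_bcand (N S p : Int) (hN : 0 ≤ N)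
    (hsf : ∀ b : Int, 2 ≤ b → b ≤ (pvSqrt N.toNat : Int) + 1 → pvDigits b N ≠ S)
    (hp1 : 1 ≤ p) (hc : CandP S (N - S) p) (hgood : p < (N - S) / p + 1) :
    BcandP S (pvSqrt N.toNat : Int) (N - S) p := by
  obtain ⟨hdvd, hc1, hc2, hc3⟩ := hc
  refine ⟨hp1, hdvd, ?_, hc2, hc3, hgood⟩
  by_contra hsmall
  push_neg at hsmall
  set b : Int := (N - S) / p + 1 with hbdef
  have hb2 : 2 ≤ b := hc1
  have hble : b ≤ (pvSqrt N.toNat : Int) + 1 := by omega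
  obtain ⟨c, hcd⟩ := Int.dvd_of_emod_eq_zero hdvd
  have hdp : (N - S) / p = c := by rw [hcd, Int.mul_ediv_cancel_left c (by omega)]
  have hNrep : N = p * b + (S - p) := by
    rw [hbdef, hdp]
    have : N - S = p * c := hcd
    ring_nf
    omega
  have := pvDigits_two_digits b p (S - p) hb2 hp1 (by omega) hc2 hc3
  rw [← hNrep] at this
  exact hsf b hb2 hble (by omega)

-- ===== VERDICT (by name: the statement is the Claim_ definition above) =====
-- small-fail transfer: the first loop finding nothing means no base in [2, r+1] works
lemma smallfail_of_none (N S : Int)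
    (hnone : solveSmall N S (PySem.List.pyRange 2 ((pvSqrt N.toNat : Int) + 2) 1) = none) :
    ∀ b : Int, 2 ≤ b → b ≤ (pvSqrt N.toNat : Int) + 1 → pvDigits b N ≠ S := by
  intro b hb1 hb2
  have hmem : b ∈ PySem.List.pyRange 2 ((pvSqrt N.toNat : Int) + 2) 1 :=
    PySem.List.mem_pyRange_one.mpr ⟨hb1, by omega⟩
  exact ((solveSmall_eq_none_iff N S _
    (fun x hx => (PySem.List.mem_pyRange_one.mp hx).1)).mp hnone) b hmem

-- both solvers, after the common first phase finds nothing, reduced to their second phase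
lemma solve_eq_aScan (N S : Int) (hsn : S ≠ N)
    (hnone : solveSmall N S (PySem.List.pyRange 2 ((pvSqrt N.toNat : Int) + 2) 1) = none) :
    solve N S = aScan S (N - S) (pvSqrt N.toNat + 1) := by
  rw [solve, if_neg (by simpa using hsn)]
  simp only [hnone]
  have hcast : ((pvSqrt N.toNat + 1 : Nat) : Int) = (pvSqrt N.toNat : Int) + 1 := by push_cast; ring
  rw [← hcast, solveBig_eq_aScan]

lemma solve_alt_eq_divLoop (N S : Int) (hsn : S ≠ N)
    (hnone : solveSmall N S (PySem.List.pyRange 2 ((pvSqrt N.toNat : Int) + 2) 1) = none) :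
    solve_alt N S = divLoopGo S (pvSqrt N.toNat : Int) (N - S) (N - S).toNat 1 (-1) := by
  rw [solve_alt, if_neg (by simpa using hsn)]
  have hnone' : smallLoop N S (PySem.List.pyRange 2 ((pvSqrt N.toNat : Int) + 2) 1) = none := by
    rw [smallLoop_eq_solveSmall N S _ (fun x hx => (PySem.List.mem_pyRange_one.mp hx).1)]
    exact hnone
  simp only [hnone']

theorem solve_spec : Claim_unchanged_solve := by
  intro N S hdom hpre
  have hNdom : N ≤ 2147483648 := by
    simp only [Dom_solve, Bool.and_eq_true, pvDomInt, decide_eq_true_iff] at hdom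
    exact hdom.1.2
  show ¬ D_solve N S → solve N S = solve_alt N S
  intro hnd
  have hN : (0 : Int) ≤ N := hpre
  by_cases hsn : S = N
  · rw [solve, solve_alt, if_pos (by simpa using hsn), if_pos (by simpa using hsn)]
  -- first phase: identical loops
  cases hsmall : solveSmall N S (PySem.List.pyRange 2 ((pvSqrt N.toNat : Int) + 2) 1) with
  | some b =>
    rw [solve, solve_alt, if_neg (by simpa using hsn), if_neg (by simpa using hsn)]
    have heq : smallLoop N S (PySem.List.pyRange 2 ((pvSqrt N.toNat : Int) + 2) 1) =
        solveSmall N S (PySem.List.pyRange 2 ((pvSqrt N.toNat : Int) + 2) 1) :=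
      smallLoop_eq_solveSmall N S _ (fun x hx => (PySem.List.mem_pyRange_one.mp hx).1)
    simp only [hsmall, heq]
  | none =>
    rw [solve_eq_aScan N S hsn hsmall, solve_alt_eq_divLoop N S hsn hsmall]
    have hsf := smallfail_of_none N S hsmall
    set r : Int := (pvSqrt N.toNat : Int) with hrdef
    have hr0 : (0 : Int) ≤ r := by rw [hrdef]; positivity
    -- no input of D_: since the first three conjuncts hold, the fourth fails
    have hnb : ∀ p : Int, 1 ≤ p → p ≤ r + 1 → CandP S (N - S) p → p < (N - S) / p + 1 := by
      intro p h1 h2 hc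
      by_contra hbad
      push_neg at hbad
      apply hnd
      obtain ⟨hdvd, hcc1, hcc2, hcc3⟩ := hc
      refine ⟨hN, hsn, ?_, ⟨p.toNat,
        Finset.mem_Icc.mpr ⟨by omega, by rw [hrdef] at h2; omega⟩, ?_⟩⟩
      · intro b hb
        obtain ⟨hb2, hble⟩ := Finset.mem_Icc.mp hb
        have hpow : N.toNat < b ^ 32 := by
          calc N.toNat < 2 ^ 32 := by omega
            _ ≤ b ^ 32 := Nat.pow_le_pow_left hb2 32
        rw [pvDS_eq 32 b N.toNat hb2 hpow, Int.toNat_of_nonneg hN]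
        refine hsf (b : Int) (by exact_mod_cast hb2) ?_
        rw [hrdef]
        exact_mod_cast hble
      · have hcast : ((p.toNat : Nat) : Int) = p := Int.toNat_of_nonneg (by omega)
        rw [hcast]
        exact ⟨hdvd, by linarith, by linarith, by linarith, by linarith⟩
    by_cases hex : ∃ p : Int, (1 ≤ p ∧ p ≤ r + 1) ∧ CandP S (N - S) p
    · obtain ⟨pm, ⟨⟨hpm1, hpm2⟩, hpmc⟩, hpmax⟩ :=
        Int.exists_greatest_of_bdd (P := fun p => (1 ≤ p ∧ p ≤ r + 1) ∧ CandP S (N - S) p)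
          ⟨r + 1, fun z hz => hz.1.2⟩ hex
      have hgood := hnb pm hpm1 hpm2 hpmc
      have hbc : BcandP S r (N - S) pm := cand_to_bcand N S pm hN hsf hpm1 hpmc hgood
      rw [aScan_of_max S (N - S) (pvSqrt N.toNat + 1) pm hpmc hpm1 (by push_cast; omega)
        (fun p hp1 hp2 => fun hc => absurd (hpmax p ⟨⟨by omega, by push_cast at hp2 ⊢; omega⟩, hc⟩) (by omega))]
      rw [divLoop_of_max S r (N - S) hr0 pm hbc
        (fun p hp => hpmax p ⟨⟨(bcand_to_cand N S p hN hp).2.1, (bcand_to_cand N S p hN hp).2.2⟩,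
          (bcand_to_cand N S p hN hp).1⟩) (N - S).toNat ?_]
      -- pm ≤ N - S, so the fuel suffices
      obtain ⟨_, _, _, _, _, hc4⟩ := hbc
      have hpp : pm * pm ≤ N - S := by
        have h5 : pm ≤ (N - S) / pm := by omega
        have := (Int.le_ediv_iff_mul_le (show (0:Int) < pm by omega)).mp h5
        linarith
      have : pm ≤ N - S := by nlinarith
      omega
    · rw [aScan_of_none S (N - S) (pvSqrt N.toNat + 1)
        (fun p h1 h2 hc => hex ⟨p, ⟨h1, by push_cast at h2 ⊢; omega⟩, hc⟩)]
      rw [divLoop_of_none S r (N - S) (N - S).toNat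
        (fun p hp => hex ⟨p, ⟨(bcand_to_cand N S p hN hp).2.1, (bcand_to_cand N S p hN hp).2.2⟩,
          (bcand_to_cand N S p hN hp).1⟩)]

theorem solve_changed : Claim_changed_solve := by
  unfold Claim_changed_solve; decide

theorem solve_tight : Claim_exact_solve := by
  intro N S hdom hpre hd
  have hNdom : N ≤ 2147483648 := by
    simp only [Dom_solve, Bool.and_eq_true, pvDomInt, decide_eq_true_iff] at hdom
    exact hdom.1.2
  obtain ⟨hN, hsn, hsfN, p0, hp0mem, hp0dvd, hq1, hq2, hq3, hq4⟩ := hd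
  obtain ⟨hp01, hp0N⟩ := Finset.mem_Icc.mp hp0mem
  have hp0c1 : 2 ≤ (N - S) / (p0 : Int) + 1 := by linarith
  have hp0c2 : 0 ≤ S - (p0 : Int) := by linarith
  have hp0c3 : S - (p0 : Int) < (N - S) / (p0 : Int) + 1 := by linarith
  have hp0bad : (N - S) / (p0 : Int) + 1 ≤ (p0 : Int) := by linarith
  set r : Int := (pvSqrt N.toNat : Int) with hrdef
  have hr0 : (0 : Int) ≤ r := by rw [hrdef]; positivity
  -- the first phase finds nothing (that is the third conjunct of D_)
  have hnone : solveSmall N S (PySem.List.pyRange 2 (r + 2) 1) = none := by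
    rw [solveSmall_eq_none_iff N S _ (fun x hx => (PySem.List.mem_pyRange_one.mp hx).1)]
    intro b hb
    obtain ⟨hb1, hb2⟩ := PySem.List.mem_pyRange_one.mp hb
    have hb2' : b.toNat ≤ pvSqrt N.toNat + 1 := by rw [hrdef] at hb2; omega
    have hbn2 : 2 ≤ b.toNat := by omega
    have hpow : N.toNat < b.toNat ^ 32 := by
      calc N.toNat < 2 ^ 32 := by omega
        _ ≤ b.toNat ^ 32 := Nat.pow_le_pow_left hbn2 32
    have := hsfN b.toNat (Finset.mem_Icc.mpr ⟨hbn2, hb2'⟩)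
    rw [pvDS_eq 32 b.toNat N.toNat hbn2 hpow, Int.toNat_of_nonneg hN,
      Int.toNat_of_nonneg (show (0:Int) ≤ b by omega)] at this
    exact this
  rw [solve_eq_aScan N S hsn hnone, solve_alt_eq_divLoop N S hsn hnone]
  -- there is a candidate (p0), so A returns the base of the greatest candidate pm
  set P : Int → Prop := fun p => (1 ≤ p ∧ p ≤ r + 1) ∧ CandP S (N - S) p with hPdef
  have hP0 : P (p0 : Int) := ⟨⟨by exact_mod_cast hp01, by rw [hrdef]; exact_mod_cast hp0N⟩,
    ⟨hp0dvd, hp0c1, hp0c2, hp0c3⟩⟩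
  clear hq1 hq2 hq3 hq4
  obtain ⟨pm, ⟨⟨hpm1, hpm2⟩, hpmc⟩, hpmax⟩ :=
    Int.exists_greatest_of_bdd (P := P) ⟨r + 1, fun z hz => hz.1.2⟩ ⟨(p0 : Int), hP0⟩
  rw [aScan_of_max S (N - S) (pvSqrt N.toNat + 1) pm hpmc hpm1 (by rw [hrdef] at hpm2; push_cast; omega)
    (fun p hp1 hp2 => fun hc => absurd (hpmax p ⟨⟨by omega, by rw [hrdef]; push_cast at hp2 ⊢; omega⟩, hc⟩) (by omega))]
  -- the greatest candidate is itself a bad one: its base stays ≤ r + 1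
  have hpmp0 : (p0 : Int) ≤ pm := hpmax _ hP0
  have hbadsq : N - S < (p0 : Int) * (p0 : Int) := by
    obtain ⟨c, hcd⟩ := Int.dvd_of_emod_eq_zero hp0dvd
    have hdp : (N - S) / (p0 : Int) = c := by
      have : ((p0 : Int)) ≠ 0 := by positivity
      rw [hcd, Int.mul_ediv_cancel_left c this]
    rw [hdp] at hp0c1 hp0c3 hp0bad
    have hcp : c ≤ (p0 : Int) - 1 := by omega
    have hp0pos : (1 : Int) ≤ (p0 : Int) := by exact_mod_cast hp01
    nlinarith [hcd]
  have hAle : (N - S) / pm + 1 ≤ r + 1 := by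
    -- pm is bad: if pm < (N-S)/pm + 1 then pm² ≤ N - S < p0² ≤ pm², contradiction
    by_cases hgood : pm < (N - S) / pm + 1
    · exfalso
      have h5 : pm ≤ (N - S) / pm := by omega
      have hpp : pm * pm ≤ N - S :=
        le_trans (by nlinarith [(Int.le_ediv_iff_mul_le (show (0:Int) < pm by omega)).mp h5]) (le_refl _)
      have hp0pos : (1 : Int) ≤ (p0 : Int) := by exact_mod_cast hp01
      nlinarith
    · push_neg at hgood
      omega
  have hA2 : 2 ≤ (N - S) / pm + 1 := hpmc.2.1
  -- B returns -1 or a base ≥ r + 2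
  intro hcontra
  rcases divLoopGo_sound S r (N - S) (N - S).toNat 1 (-1) (by omega) (Or.inl rfl) with hres | ⟨p', hp', hres⟩
  · rw [hres] at hcontra; omega
  · rw [hres] at hcontra
    obtain ⟨_, _, hge, _, _, _⟩ := hp'
    omega
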